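-- pv_equiv track=rewrite | github.com/fanxin-cug/CS61A-Su19 | lab03/lab03_extra.py | ten_pairs
-- ===== SOURCE A (Python) =====
-- def ten_pairs(n):
--     """Return the number of ten-pairs within positive integer n.
--
--     >>> ten_pairs(7823952)
--     3
--     >>> ten_pairs(55055)
--     6
--     >>> ten_pairs(9641469)
--     6
--     """
--     "*** YOUR CODE HERE ***"
--     def helper(n, k):
--         count = 0
--         while n > 0:
--             if n % 10 == k:
--                 count += 1
--             n //= 10
--         return count
--     res = 0
--     for i in range(1, 5):
--         res += helper(n, i) * helper(n, 10 - i)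
--     res += helper(n, 5) * (helper(n, 5) - 1) // 2
--     return res
-- ===== SOURCE B (Python) =====
-- def ten_pairs(n):
--     """Return the number of ten-pairs within positive integer n."""
--     def count_digit(m, d):
--         if m <= 0:
--             return 0
--         return (1 if m % 10 == d else 0) + count_digit(m // 10, d)
--     if n < 10:
--         return 0
--     return ten_pairs(n // 10) + count_digit(n // 10, 10 - n % 10)
-- ===== Notes on version B (the rewrite author's own statement) =====
-- stated objective: alternative
-- what changed: A makes nine separate digit-counting scans and combines the frequencies with a product/choose-2 formula; B counts pairs directly by recursing on the number, adding for each digit the number of more-significant digits that complement it to ten, with no frequency combine at all.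
import Mathlib
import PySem

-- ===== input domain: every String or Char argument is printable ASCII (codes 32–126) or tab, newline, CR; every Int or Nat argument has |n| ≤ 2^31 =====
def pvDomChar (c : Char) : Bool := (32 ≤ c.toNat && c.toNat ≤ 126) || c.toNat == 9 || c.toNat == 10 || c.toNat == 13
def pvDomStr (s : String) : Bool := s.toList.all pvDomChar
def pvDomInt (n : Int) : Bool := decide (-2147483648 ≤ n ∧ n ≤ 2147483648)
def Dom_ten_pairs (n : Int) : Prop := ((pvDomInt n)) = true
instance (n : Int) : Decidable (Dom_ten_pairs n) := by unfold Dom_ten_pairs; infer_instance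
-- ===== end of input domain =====

-- B counts ten-pairs directly by recursion on the number (each digit paired with its
-- complements among more-significant digits), replacing A's nine frequency scans and
-- arithmetic combine (objective: alternative algorithm, similar cost).


-- ===== PORT A =====
-- helper(n, k): count occurrences of digit k while consuming n (A's inner while loop)
def tpHelper (n k count : Int) : Int :=
  if 0 < n then
    tpHelper (PySem.Int.floordiv n 10) k
      (if PySem.Int.mod n 10 = k then count + 1 else count)
  else count
termination_by n.toNat
decreasing_by
  rw [PySem.Int.floordiv_eq_ediv_of_pos (by norm_num : (0:Int) < 10)]
  omega

def ten_pairs (n : Int) : Int :=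
  let res := (PySem.List.pyRange 1 5 1).foldl
    (fun res i => res + tpHelper n i 0 * tpHelper n (10 - i) 0) 0
  res + PySem.Int.floordiv (tpHelper n 5 0 * (tpHelper n 5 0 - 1)) 2

-- ===== PORT B =====
-- count_digit(m, d): recursively count occurrences of digit d in m
def tpCountDigit (m d : Int) : Int :=
  if m ≤ 0 then 0
  else (if PySem.Int.mod m 10 = d then 1 else 0) + tpCountDigit (PySem.Int.floordiv m 10) d
termination_by m.toNat
decreasing_by
  rw [PySem.Int.floordiv_eq_ediv_of_pos (by norm_num : (0:Int) < 10)]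
  omega

def ten_pairs_alt (n : Int) : Int :=
  if n < 10 then 0
  else ten_pairs_alt (PySem.Int.floordiv n 10)
      + tpCountDigit (PySem.Int.floordiv n 10) (10 - PySem.Int.mod n 10)
termination_by n.toNat
decreasing_by
  rw [PySem.Int.floordiv_eq_ediv_of_pos (by norm_num : (0:Int) < 10)]
  omega

-- ===== PRECONDITION & SPEC =====
def Spec_ten_pairs (n : Int) (out : Int) : Prop := out = ten_pairs_alt n
instance (n : Int) (out : Int) : Decidable (Spec_ten_pairs n out) := by unfold Spec_ten_pairs; infer_instance

-- ===== CLAIM (what is proved, stated in full; the proofs are below) =====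
def Claim_equal_ten_pairs : Prop := ∀ (n : Int), Dom_ten_pairs n → Spec_ten_pairs n (ten_pairs n)

-- ===== LEMMAS AND PROOFS =====

theorem tpStep_lt {n : Int} (h : 0 < n) :
    (PySem.Int.floordiv n 10).toNat < n.toNat := by
  rw [PySem.Int.floordiv_eq_ediv_of_pos (by norm_num : (0:Int) < 10)]
  omega

theorem tpMod_bounds {n : Int} (_h : 0 < n) :
    0 ≤ PySem.Int.mod n 10 ∧ PySem.Int.mod n 10 < 10 := by
  rw [PySem.Int.mod_eq_emod_of_pos (by norm_num : (0:Int) < 10)]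
  omega

theorem tpHelper_acc (m : Nat) (n k c : Int) (hm : n.toNat ≤ m) :
    tpHelper n k c = c + tpHelper n k 0 := by
  induction m generalizing n c with
  | zero =>
    rw [tpHelper, if_neg (by omega), tpHelper, if_neg (by omega)]
    ring
  | succ m ih =>
    by_cases h : 0 < n
    · have hlt := tpStep_lt h
      rw [tpHelper, if_pos h]
      conv_rhs => rw [tpHelper, if_pos h]
      split_ifs with hd
      · rw [ih _ (c + 1) (by omega), ih _ (0 + 1) (by omega)]
        ring
      · rw [ih _ c (by omega)]
    · rw [tpHelper, if_neg h, tpHelper, if_neg h]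
      ring

theorem tpHelper_unfold {n : Int} (h : 0 < n) (k : Int) :
    tpHelper n k 0 = (if PySem.Int.mod n 10 = k then 1 else 0)
      + tpHelper (PySem.Int.floordiv n 10) k 0 := by
  rw [tpHelper, if_pos h]
  split_ifs with hd
  · rw [tpHelper_acc (PySem.Int.floordiv n 10).toNat _ _ _ le_rfl]
    ring
  · rw [zero_add]

theorem tpHelper_zero {n k : Int} (h : ¬ 0 < n) : tpHelper n k 0 = 0 := by
  rw [tpHelper, if_neg h]

theorem tpHelper_ten (m : Nat) (n : Int) (hm : n.toNat ≤ m) : tpHelper n 10 0 = 0 := by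
  induction m generalizing n with
  | zero => exact tpHelper_zero (by omega)
  | succ m ih =>
    by_cases h : 0 < n
    · have hb := tpMod_bounds h
      have hlt := tpStep_lt h
      rw [tpHelper_unfold h, if_neg (by omega), ih _ (by omega)]
      norm_num
    · exact tpHelper_zero h

theorem tpCount_eq (m : Nat) (x d : Int) (hm : x.toNat ≤ m) :
    tpCountDigit x d = tpHelper x d 0 := by
  induction m generalizing x with
  | zero =>
    rw [tpCountDigit, if_pos (by omega), tpHelper_zero (by omega)]
  | succ m ih =>
    by_cases h : 0 < x
    · have hlt := tpStep_lt h
      rw [tpCountDigit, if_neg (by omega), ih _ (by omega), tpHelper_unfold h]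
    · rw [tpCountDigit, if_pos (by omega), tpHelper_zero h]

-- proof-side closed form of A's result
def tpF (n : Int) : Int :=
  (0 + tpHelper n 1 0 * tpHelper n 9 0 + tpHelper n 2 0 * tpHelper n 8 0
     + tpHelper n 3 0 * tpHelper n 7 0 + tpHelper n 4 0 * tpHelper n 6 0)
  + PySem.Int.floordiv (tpHelper n 5 0 * (tpHelper n 5 0 - 1)) 2

theorem ten_pairs_eq_tpF (n : Int) : ten_pairs n = tpF n := by
  show (PySem.List.pyRange 1 5 1).foldl
      (fun res i => res + tpHelper n i 0 * tpHelper n (10 - i) 0) 0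
      + PySem.Int.floordiv (tpHelper n 5 0 * (tpHelper n 5 0 - 1)) 2 = tpF n
  rw [show PySem.List.pyRange 1 5 1 = [1, 2, 3, 4] by decide]
  simp only [List.foldl]
  norm_num [tpF]

theorem tpFd5 (a : Int) : (1 + a) * a / 2 = a * (a - 1) / 2 + a := by
  rw [show (1 + a) * a = a * (a - 1) + a * 2 by ring,
      Int.add_mul_ediv_right _ _ (by norm_num : (2:Int) ≠ 0)]

theorem tpF_step {n : Int} (h : 0 < n) :
    tpF n = tpF (PySem.Int.floordiv n 10)
      + tpHelper (PySem.Int.floordiv n 10) (10 - PySem.Int.mod n 10) 0 := by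
  obtain ⟨hb1, hb2⟩ := tpMod_bounds h
  have h10 := tpHelper_ten (PySem.Int.floordiv n 10).toNat _ le_rfl
  unfold tpF
  rw [tpHelper_unfold h 1, tpHelper_unfold h 2, tpHelper_unfold h 3, tpHelper_unfold h 4,
      tpHelper_unfold h 5, tpHelper_unfold h 6, tpHelper_unfold h 7, tpHelper_unfold h 8,
      tpHelper_unfold h 9]
  rw [PySem.Int.floordiv_eq_ediv_of_pos (by norm_num : (0:Int) < 10)] at h10
  interval_cases hm : (PySem.Int.mod n 10) <;> norm_num <;>
    first
      | exact h10
      | ring1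
      | (linarith [tpFd5 (tpHelper (n / 10) 5 0)])

theorem tpFd_zero : PySem.Int.floordiv (0 : Int) 2 = 0 := by
  rw [PySem.Int.floordiv_eq_ediv_of_pos (by norm_num : (0:Int) < 2)]
  norm_num

theorem tpF_nonpos {n : Int} (hp : ¬ 0 < n) : tpF n = 0 := by
  unfold tpF
  rw [tpHelper_zero hp, tpHelper_zero hp, tpHelper_zero hp,
      tpHelper_zero hp, tpHelper_zero hp, tpHelper_zero hp,
      tpHelper_zero hp, tpHelper_zero hp, tpHelper_zero hp]
  norm_num [tpFd_zero]

theorem tpF_small {n : Int} (hp : 0 < n) (hs : n < 10) : tpF n = 0 := by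
  have hrest : PySem.Int.floordiv n 10 = 0 := by
    rw [PySem.Int.floordiv_eq_ediv_of_pos (by norm_num : (0:Int) < 10)]
    omega
  have hmod : PySem.Int.mod n 10 = n := by
    rw [PySem.Int.mod_eq_emod_of_pos (by norm_num : (0:Int) < 10)]
    omega
  have Hk : ∀ k : Int, tpHelper n k 0 = if n = k then 1 else 0 := by
    intro k
    rw [tpHelper_unfold hp k, hrest, tpHelper_zero (by omega), hmod, add_zero]
  unfold tpF
  rw [Hk 1, Hk 2, Hk 3, Hk 4, Hk 5, Hk 6, Hk 7, Hk 8, Hk 9]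
  interval_cases n <;> norm_num [tpFd_zero]

theorem alt_eq_tpF (m : Nat) (n : Int) (hm : n.toNat ≤ m) :
    ten_pairs_alt n = tpF n := by
  induction m generalizing n with
  | zero =>
    rw [ten_pairs_alt, if_pos (by omega), tpF_nonpos (by omega)]
  | succ m ih =>
    by_cases hs : n < 10
    · rw [ten_pairs_alt, if_pos hs]
      by_cases hp : 0 < n
      · rw [tpF_small hp hs]
      · rw [tpF_nonpos hp]
    · have hp : 0 < n := by omega
      have hlt := tpStep_lt hp
      rw [ten_pairs_alt, if_neg hs, ih _ (by omega),
          tpCount_eq (PySem.Int.floordiv n 10).toNat _ _ le_rfl, tpF_step hp]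

-- ===== VERDICT (by name: the statement is the Claim_ definition above) =====
theorem ten_pairs_spec : Claim_equal_ten_pairs := by
  intro n _
  show ten_pairs n = ten_pairs_alt n
  rw [ten_pairs_eq_tpF, alt_eq_tpF n.toNat n le_rfl]
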